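-- pv_equiv track=rewrite | github.com/RifqiAbbiyu6822/disposisi | edit_logic.py | build_complete_data
-- ===== SOURCE A (Python) =====
-- def build_complete_data(data_lama, data_baru, header):
--     """Build complete data with robust null handling"""
--     result = {}
--     for col in header:
--         # Prioritize new data, fallback to old data, then empty string
--         if col in data_baru and data_baru[col] is not None:
--             result[col] = data_baru[col]
--         elif col in data_lama and data_lama[col] is not None:
--             result[col] = data_lama[col]
--         else:
--             result[col] = ""
--     return result
-- ===== SOURCE B (Python) =====
-- def build_complete_data(data_lama, data_baru, header):
--     """Build complete data with robust null handling"""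
--     merged = {}
--     for k, v in data_lama.items():
--         if v is not None:
--             merged[k] = v
--     for k, v in data_baru.items():
--         if v is not None:
--             merged[k] = v
--     return {col: merged.get(col, "") for col in header}
-- ===== Notes on version B (the rewrite author's own statement) =====
-- stated objective: idiomatic
-- what changed: Instead of probing both dicts with membership tests per header column, B first builds one merged dict (old non-None values, then new non-None values overriding) and then projects it over header with a single dict comprehension using .get(col, '').
import Mathlib
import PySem

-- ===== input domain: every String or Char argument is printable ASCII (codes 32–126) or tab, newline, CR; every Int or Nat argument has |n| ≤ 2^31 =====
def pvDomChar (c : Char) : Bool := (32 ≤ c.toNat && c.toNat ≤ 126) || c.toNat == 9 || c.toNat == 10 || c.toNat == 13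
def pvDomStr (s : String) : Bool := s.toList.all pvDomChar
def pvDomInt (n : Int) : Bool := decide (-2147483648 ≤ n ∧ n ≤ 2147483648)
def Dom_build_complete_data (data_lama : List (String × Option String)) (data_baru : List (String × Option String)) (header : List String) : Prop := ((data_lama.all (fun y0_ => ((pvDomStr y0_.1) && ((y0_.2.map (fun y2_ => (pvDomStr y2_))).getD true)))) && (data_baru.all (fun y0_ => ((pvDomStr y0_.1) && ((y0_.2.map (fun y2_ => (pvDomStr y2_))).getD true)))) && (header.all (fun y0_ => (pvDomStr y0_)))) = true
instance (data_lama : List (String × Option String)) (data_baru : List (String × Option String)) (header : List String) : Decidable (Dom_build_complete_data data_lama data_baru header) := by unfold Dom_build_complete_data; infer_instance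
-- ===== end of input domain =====

-- B replaces the per-column probing of both dicts by one merged lookup dict plus a
-- projection pass over header (more idiomatic; same cost).

-- ===== PORT A =====
-- first-match association-list lookup: 'col in d' / 'd[col]' on the dict argument
def pvDGet? (d : List (String × Option String)) (k : String) : Option (Option String) :=
  match d with
  | [] => none
  | (k', v) :: t => if k' == k then some v else pvDGet? t k

def build_complete_data (data_lama : List (String × Option String)) (data_baru : List (String × Option String)) (header : List String) : List (String × String) :=
  (header.foldl (fun (result : PySem.Dict String String) col =>
    match pvDGet? data_baru col with
    | some (some v) => result.insert col v
    | _ =>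
      match pvDGet? data_lama col with
      | some (some v) => result.insert col v
      | _ => result.insert col "") PySem.Dict.empty).items

-- ===== PORT B =====
def build_complete_data_alt (data_lama : List (String × Option String)) (data_baru : List (String × Option String)) (header : List String) : List (String × String) :=
  let m1 := data_lama.foldl (fun (m : PySem.Dict String String) kv =>
      match kv.2 with
      | some v => m.insert kv.1 v
      | none => m) PySem.Dict.empty
  let merged := data_baru.foldl (fun (m : PySem.Dict String String) kv =>
      match kv.2 with
      | some v => m.insert kv.1 v
      | none => m) m1
  (header.foldl (fun (result : PySem.Dict String String) col =>
      result.insert col (merged.getD col "")) PySem.Dict.empty).items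

-- ===== PRECONDITION & SPEC =====
-- Pre_ only requires the two dict arguments to be genuine dict encodings (distinct keys),
-- as every Python dict is: it excludes no input the Python function receives.
def Pre_build_complete_data (data_lama : List (String × Option String)) (data_baru : List (String × Option String)) (header : List String) : Prop :=
  (data_lama.map Prod.fst).Nodup ∧ (data_baru.map Prod.fst).Nodup
instance (data_lama : List (String × Option String)) (data_baru : List (String × Option String)) (header : List String) : Decidable (Pre_build_complete_data data_lama data_baru header) := by unfold Pre_build_complete_data; infer_instance
def pvWitness_build_complete_data : (List (String × Option String)) × (List (String × Option String)) × List String :=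
  ([("a", some "1"), ("b", none)], [("b", some "2")], ["a", "b", "c"])

def Spec_build_complete_data (data_lama : List (String × Option String)) (data_baru : List (String × Option String)) (header : List String) (out : List (String × String)) : Prop := out = build_complete_data_alt data_lama data_baru header
instance (data_lama : List (String × Option String)) (data_baru : List (String × Option String)) (header : List String) (out : List (String × String)) : Decidable (Spec_build_complete_data data_lama data_baru header out) := by unfold Spec_build_complete_data; infer_instance

-- ===== CLAIM (what is proved, stated in full; the proofs are below) =====
def Claim_equal_build_complete_data : Prop := ∀ (data_lama : List (String × Option String)) (data_baru : List (String × Option String)) (header : List String), Dom_build_complete_data data_lama data_baru header → Pre_build_complete_data data_lama data_baru header → Spec_build_complete_data data_lama data_baru header (build_complete_data data_lama data_baru header)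

-- ===== LEMMAS AND PROOFS =====

-- the merge step used by B
def pvMergeStep (m : PySem.Dict String String) (kv : String × Option String) : PySem.Dict String String :=
  match kv.2 with
  | some v => m.insert kv.1 v
  | none => m

theorem foldl_mergeStep_get?_not_mem (l : List (String × Option String)) (m : PySem.Dict String String)
    (col : String) (h : col ∉ l.map Prod.fst) :
    (l.foldl pvMergeStep m).get? col = m.get? col := by
  induction l generalizing m with
  | nil => rfl
  | cons kv t ih =>
    simp only [List.map_cons, List.mem_cons] at h
    push Not at h
    simp only [List.foldl_cons]
    rw [ih _ h.2]
    cases hv : kv.2 with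
    | none => simp [pvMergeStep, hv]
    | some v => simp [pvMergeStep, hv, PySem.Dict.get?_insert_of_ne (hne := h.1)]

theorem foldl_mergeStep_get? (l : List (String × Option String)) (m : PySem.Dict String String)
    (col : String) (h : (l.map Prod.fst).Nodup) :
    (l.foldl pvMergeStep m).get? col =
      (match pvDGet? l col with
       | some (some v) => some v
       | _ => m.get? col) := by
  induction l generalizing m with
  | nil => rfl
  | cons kv t ih =>
    obtain ⟨k, v⟩ := kv
    simp only [List.map_cons, List.nodup_cons] at h
    simp only [List.foldl_cons, pvDGet?]
    by_cases hk : k = col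
    · subst hk
      rw [foldl_mergeStep_get?_not_mem _ _ _ h.1]
      cases v with
      | none => simp [pvMergeStep]
      | some w => simp [pvMergeStep, PySem.Dict.get?_insert_self]
    · have hbeq : (k == col) = false := by simp [hk]
      rw [ih _ h.2]
      simp only [hbeq]
      cases v with
      | none => simp [pvMergeStep]
      | some w => simp [pvMergeStep, PySem.Dict.get?_insert_of_ne (hne := fun e => hk e.symm)]

-- per-column value A inserts equals B's merged.getD col ""
theorem merged_getD (data_lama data_baru : List (String × Option String)) (col : String)
    (h1 : (data_lama.map Prod.fst).Nodup) (h2 : (data_baru.map Prod.fst).Nodup) :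
    (data_baru.foldl pvMergeStep (data_lama.foldl pvMergeStep PySem.Dict.empty)).getD col "" =
      (match pvDGet? data_baru col with
       | some (some v) => v
       | _ =>
         match pvDGet? data_lama col with
         | some (some v) => v
         | _ => "") := by
  rw [PySem.Dict.getD_eq_get?_getD, foldl_mergeStep_get? _ _ _ h2, foldl_mergeStep_get? _ _ _ h1]
  cases hb : pvDGet? data_baru col with
  | some ob =>
    cases ob with
    | some v => rfl
    | none =>
      cases hl : pvDGet? data_lama col with
      | some ol => cases ol <;> simp [PySem.Dict.get?_empty]
      | none => simp [PySem.Dict.get?_empty]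
  | none =>
    cases hl : pvDGet? data_lama col with
    | some ol => cases ol <;> simp [PySem.Dict.get?_empty]
    | none => simp [PySem.Dict.get?_empty]

-- the two header folds agree step by step
theorem header_fold_eq (data_lama data_baru : List (String × Option String))
    (h1 : (data_lama.map Prod.fst).Nodup) (h2 : (data_baru.map Prod.fst).Nodup) :
    ∀ (header : List String) (acc : PySem.Dict String String),
    header.foldl (fun (result : PySem.Dict String String) col =>
      match pvDGet? data_baru col with
      | some (some v) => result.insert col v
      | _ =>
        match pvDGet? data_lama col with
        | some (some v) => result.insert col v
        | _ => result.insert col "") acc =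
    header.foldl (fun (result : PySem.Dict String String) col =>
      result.insert col ((data_baru.foldl pvMergeStep (data_lama.foldl pvMergeStep PySem.Dict.empty)).getD col "")) acc := by
  intro header
  induction header with
  | nil => intro acc; rfl
  | cons c t ih =>
    intro acc
    simp only [List.foldl_cons]
    rw [ih]
    congr 2
    rw [merged_getD data_lama data_baru c h1 h2]
    cases hb : pvDGet? data_baru c with
    | some ob =>
      cases ob with
      | some v => rfl
      | none => cases hl : pvDGet? data_lama c with
        | some ol => cases ol <;> rfl
        | none => rfl
    | none =>
      cases hl : pvDGet? data_lama c with
      | some ol => cases ol <;> rfl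
      | none => rfl

-- ===== VERDICT (by name: the statement is the Claim_ definition above) =====
theorem build_complete_data_spec : Claim_equal_build_complete_data := by
  intro data_lama data_baru header _hdom hpre
  unfold Spec_build_complete_data build_complete_data build_complete_data_alt
  obtain ⟨h1, h2⟩ := hpre
  congr 1
  exact header_fold_eq data_lama data_baru h1 h2 header PySem.Dict.empty
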